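-- pv_equiv track=rewrite | github.com/VanDarakHome/Wordly2.0 | Wordly_helper.py | get_masked_words
-- ===== SOURCE A (Python) =====
-- def get_masked_words(mask, dictionary):
--     list_of_words = []
--     word_len = len(mask)
--     for word in dictionary:
--         if len(word) != word_len:
--             continue
--         match = True
--         for i in range(word_len):
--             if mask[i] != '_' and mask[i] != word[i]:
--                 match = False
--                 break
--         if match:
--             list_of_words.append(word)
--     return list_of_words
-- ===== SOURCE B (Python) =====
-- def get_masked_words(mask, dictionary):
--     n = len(mask)
--     # candidate word indices, narrowed constraint by constraint (loops transposed vs A)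
--     survivors = [j for j, w in enumerate(dictionary) if len(w) == n]
--     for i in range(n):
--         c = mask[i]
--         if c != '_':
--             survivors = [j for j in survivors if dictionary[j][i] == c]
--     return [dictionary[j] for j in survivors]
-- ===== Notes on version B (the rewrite author's own statement) =====
-- stated objective: alternative
-- what changed: B transposes A's loops: instead of scanning each word over every mask index with a break flag, it builds the candidate index set of right-length words once and narrows it constraint by constraint across the mask's positions, then maps the surviving indices back to words.
import Mathlib
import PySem

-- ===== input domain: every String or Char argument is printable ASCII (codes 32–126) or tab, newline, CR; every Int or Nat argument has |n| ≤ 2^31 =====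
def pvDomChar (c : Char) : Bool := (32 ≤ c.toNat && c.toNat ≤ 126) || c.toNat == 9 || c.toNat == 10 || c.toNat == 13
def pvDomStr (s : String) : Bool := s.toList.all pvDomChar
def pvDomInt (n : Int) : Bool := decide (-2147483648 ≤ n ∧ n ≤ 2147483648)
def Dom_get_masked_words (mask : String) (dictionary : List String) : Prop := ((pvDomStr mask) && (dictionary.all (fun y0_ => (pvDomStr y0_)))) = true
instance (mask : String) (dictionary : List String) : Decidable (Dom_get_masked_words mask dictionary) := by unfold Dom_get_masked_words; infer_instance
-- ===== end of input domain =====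

-- B transposes A's loops: it builds a candidate index set of right-length words once, narrows it constraint by constraint over the mask's positions, then reads the surviving words back out (alternative algorithm, same results).


-- ===== PORT A =====
-- inner 'for i in range(word_len): … break' loop of A, as recursion over the index list
def pvMatchLoop (mask word : List Char) : List Nat → Bool
  | [] => true
  | i :: rest =>
    if mask.getD i ' ' ≠ '_' && mask.getD i ' ' ≠ word.getD i ' ' then false
    else pvMatchLoop mask word rest

def get_masked_words (mask : String) (dictionary : List String) : List String :=
  let word_len := mask.toList.length
  dictionary.foldl (fun list_of_words word =>
    if word.toList.length ≠ word_len then list_of_words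
    else if pvMatchLoop mask.toList word.toList (List.range word_len)
      then list_of_words ++ [word] else list_of_words) []

-- ===== PORT B =====
def get_masked_words_alt (mask : String) (dictionary : List String) : List String :=
  let n := mask.toList.length
  let survivors0 := ((PySem.List.enumerate dictionary).filter
      (fun p => p.2.toList.length == n)).map (fun p => p.1)
  let survivors := (PySem.List.pyRange 0 (n : Int) 1).foldl (fun surv i =>
      let c := PySem.List.pyGetD mask.toList i ' '
      if c != '_' then
        surv.filter (fun j => PySem.List.pyGetD (PySem.List.pyGetD dictionary j "").toList i ' ' == c)
      else surv) survivors0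
  survivors.map (fun j => PySem.List.pyGetD dictionary j "")

-- ===== PRECONDITION & SPEC =====
def Spec_get_masked_words (mask : String) (dictionary : List String) (out : List String) : Prop := out = get_masked_words_alt mask dictionary
instance (mask : String) (dictionary : List String) (out : List String) : Decidable (Spec_get_masked_words mask dictionary out) := by unfold Spec_get_masked_words; infer_instance

-- ===== CLAIM (what is proved, stated in full; the proofs are below) =====
def Claim_equal_get_masked_words : Prop := ∀ (mask : String) (dictionary : List String), Dom_get_masked_words mask dictionary → Spec_get_masked_words mask dictionary (get_masked_words mask dictionary)

-- ===== LEMMAS AND PROOFS =====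

lemma pvMatchLoop_eq_all (mask word : List Char) (is : List Nat) :
    pvMatchLoop mask word is
      = is.all (fun i => decide (mask.getD i ' ' = '_' ∨ mask.getD i ' ' = word.getD i ' ')) := by
  induction is with
  | nil => rfl
  | cons i rest ih =>
    simp only [pvMatchLoop, List.all_cons, ih]
    by_cases h1 : mask.getD i ' ' = '_' <;> by_cases h2 : mask.getD i ' ' = word.getD i ' ' <;>
      simp [*]

-- A's fold as a filter of the dictionary
lemma pvA_eq_filter (mask : String) (dictionary : List String) :
    get_masked_words mask dictionary
      = dictionary.filter (fun w =>
          (w.toList.length == mask.toList.length) &&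
          pvMatchLoop mask.toList w.toList (List.range mask.toList.length)) := by
  show dictionary.foldl (fun list_of_words word =>
    if word.toList.length ≠ mask.toList.length then list_of_words
    else if pvMatchLoop mask.toList word.toList (List.range mask.toList.length)
      then list_of_words ++ [word] else list_of_words) [] = _
  have hstep : (fun (list_of_words : List String) (word : String) =>
      if word.toList.length ≠ mask.toList.length then list_of_words
      else if pvMatchLoop mask.toList word.toList (List.range mask.toList.length)
        then list_of_words ++ [word] else list_of_words)
    = (fun (acc : List String) (word : String) =>
      if ((word.toList.length == mask.toList.length) &&
          pvMatchLoop mask.toList word.toList (List.range mask.toList.length))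
        then acc ++ [word] else acc) := by
    funext acc word
    by_cases hl : word.toList.length = mask.toList.length
    · by_cases hm : pvMatchLoop mask.toList word.toList (List.range mask.toList.length) <;>
        simp [hl]
    · have hl' : ¬ word.length = mask.length := by simpa using hl
      simp [hl']
  rw [hstep]
  simpa using PySem.List.foldl_append_if_eq_filter
    (fun w => (w.toList.length == mask.toList.length) &&
      pvMatchLoop mask.toList w.toList (List.range mask.toList.length)) dictionary []

-- B's constraint loop: folding filters equals one filter by the conjunction of all constraints
lemma pvFoldFilter {α β : Type} (cs : List β) (g : β → Bool) (f : β → α → Bool) (s0 : List α) :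
    cs.foldl (fun s c => if g c then s.filter (f c) else s) s0
      = s0.filter (fun x => cs.all (fun c => !g c || f c x)) := by
  induction cs generalizing s0 with
  | nil => simp
  | cons c cs ih =>
    simp only [List.foldl_cons, List.all_cons]
    by_cases hg : g c
    · rw [if_pos hg, ih, List.filter_filter]
      exact List.filter_congr (by intro x _; simp [hg, Bool.and_comm])
    · rw [if_neg hg, ih]
      exact List.filter_congr (by intro x _; simp [hg])
  
-- pointwise: B's per-word constraint check equals A's inner loop
lemma pvPred_eq (mask w : List Char) :
    (PySem.List.pyRange 0 (mask.length : Int) 1).all (fun i =>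
        !(PySem.List.pyGetD mask i ' ' != '_')
          || (PySem.List.pyGetD w i ' ' == PySem.List.pyGetD mask i ' '))
      = pvMatchLoop mask w (List.range mask.length) := by
  rw [pvMatchLoop_eq_all, PySem.List.pyRange_zero_natCast, List.all_map]
  apply congrArg
  funext k
  simp only [Function.comp, PySem.List.pyGetD_natCast]
  by_cases h1 : mask[k]?.getD ' ' = '_'
  · simp [h1]
  · have h1' : ¬ ('_' = mask[k]?.getD ' ') := fun h => h1 h.symm
    by_cases h2 : mask[k]?.getD ' ' = w[k]?.getD ' '
    · simp [h2]
    · have h2' : ¬ (w[k]?.getD ' ' = mask[k]?.getD ' ') := fun h => h2 h.symm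
      simp [h1, h2, h2']

-- B as a filter of the dictionary
lemma pvB_eq_filter (mask : String) (dictionary : List String) :
    get_masked_words_alt mask dictionary
      = dictionary.filter (fun w =>
          (w.toList.length == mask.toList.length) &&
          (PySem.List.pyRange 0 (mask.toList.length : Int) 1).all (fun i =>
            !(PySem.List.pyGetD mask.toList i ' ' != '_')
              || (PySem.List.pyGetD w.toList i ' ' == PySem.List.pyGetD mask.toList i ' '))) := by
  show ((PySem.List.pyRange 0 (mask.toList.length : Int) 1).foldl (fun surv i =>
      if (PySem.List.pyGetD mask.toList i ' ' != '_') then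
        surv.filter (fun j => PySem.List.pyGetD (PySem.List.pyGetD dictionary j "").toList i ' '
          == PySem.List.pyGetD mask.toList i ' ')
      else surv)
      (((PySem.List.enumerate dictionary).filter
        (fun p => p.2.toList.length == mask.toList.length)).map (fun p => p.1))).map
      (fun j => PySem.List.pyGetD dictionary j "") = _
  rw [pvFoldFilter, List.filter_map, List.filter_filter, List.map_map]
  have hmem : ∀ p ∈ PySem.List.enumerate dictionary,
      PySem.List.pyGetD dictionary p.1 "" = p.2 := by
    intro p hp
    rcases (PySem.List.mem_enumerate_iff _ _ _).1 hp with ⟨k, hk, rfl⟩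
    simp [PySem.List.pyGetD_natCast, List.getElem?_eq_getElem hk]
  have hpred : ∀ p ∈ PySem.List.enumerate dictionary,
      (((fun j => (PySem.List.pyRange 0 (mask.toList.length : Int) 1).all (fun i =>
          !(PySem.List.pyGetD mask.toList i ' ' != '_')
            || (PySem.List.pyGetD (PySem.List.pyGetD dictionary j "").toList i ' '
                == PySem.List.pyGetD mask.toList i ' '))) ∘ (fun p : Int × String => p.1)) p
        && (p.2.toList.length == mask.toList.length))
      = ((p.2.toList.length == mask.toList.length) &&
          (PySem.List.pyRange 0 (mask.toList.length : Int) 1).all (fun i =>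
            !(PySem.List.pyGetD mask.toList i ' ' != '_')
              || (PySem.List.pyGetD p.2.toList i ' ' == PySem.List.pyGetD mask.toList i ' '))) := by
    intro p hp
    simp only [Function.comp_apply]
    rw [hmem p hp]
    exact Bool.and_comm _ _
  rw [List.filter_congr hpred]
  rw [List.map_congr_left (fun p hp => by
    simp only [Function.comp_apply]
    exact hmem p (List.mem_of_mem_filter hp))]
  rw [show (fun p : Int × String => (p.2.toList.length == mask.toList.length) &&
      (PySem.List.pyRange 0 (mask.toList.length : Int) 1).all (fun i =>
        !(PySem.List.pyGetD mask.toList i ' ' != '_')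
          || (PySem.List.pyGetD p.2.toList i ' ' == PySem.List.pyGetD mask.toList i ' ')))
    = (fun w : String => (w.toList.length == mask.toList.length) &&
      (PySem.List.pyRange 0 (mask.toList.length : Int) 1).all (fun i =>
        !(PySem.List.pyGetD mask.toList i ' ' != '_')
          || (PySem.List.pyGetD w.toList i ' ' == PySem.List.pyGetD mask.toList i ' ')))
        ∘ (fun p : Int × String => p.2) from rfl]
  rw [← List.filter_map, PySem.List.map_snd_enumerate]

theorem get_masked_words_spec : Claim_equal_get_masked_words := by
  intro mask dictionary _
  unfold Spec_get_masked_words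
  rw [pvA_eq_filter, pvB_eq_filter]
  apply List.filter_congr
  intro w _
  rw [pvPred_eq mask.toList w.toList]
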